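-- pv_equiv track=rewrite | github.com/mycroft/challenges | advent-of-code/2020/day10/day10.py | get_possible_pathes
-- ===== SOURCE A (Python) =====
-- def get_possible_pathes(sets):
--     all_sets = [[]]
--
--     for current_set in sets:
--         new_all_sets = []
--         for num in current_set:
--
--             for all_set in all_sets:
--                 new_all_set = all_set.copy()
--                 if num not in new_all_set:
--                     new_all_set.append(num)
--
--                 new_all_set.sort()
--
--                 new_all_sets.append(new_all_set)
--
--         all_sets = new_all_sets
--
--     final_set = []
--
--     for all_set in all_sets:
--         if all_set not in final_set:
--             final_set.append(all_set)
--
--     return (len(final_set))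
-- ===== SOURCE B (Python) =====
-- def get_possible_pathes(sets):
--     # Bitmask encoding: give each distinct number its own bit; an arrangement
--     # (a set of chosen numbers) is the OR of its members' bits, so the states
--     # are plain machine integers and need no copying, sorting or tuple hashing.
--     bit = {}
--     for current_set in sets:
--         for num in current_set:
--             if num not in bit:
--                 bit[num] = 1 << len(bit)
--     masks = {0}
--     for current_set in sets:
--         masks = {mask | bit[num] for mask in masks for num in current_set}
--     return len(masks)
-- ===== Notes on version B (the rewrite author's own statement) =====
-- stated objective: alternative
-- what changed: B first assigns every distinct number its own bit in one indexing pass and then represents each reachable arrangement as an integer bitmask (OR of the chosen numbers' bits) kept in a set of ints, instead of materialising every product path as a copied-and-sorted list and deduplicating the list of lists quadratically at the end; the distinct-state count still grows exponentially on random inputs, so no asymptotic speed-up is claimed.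
import Mathlib
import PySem

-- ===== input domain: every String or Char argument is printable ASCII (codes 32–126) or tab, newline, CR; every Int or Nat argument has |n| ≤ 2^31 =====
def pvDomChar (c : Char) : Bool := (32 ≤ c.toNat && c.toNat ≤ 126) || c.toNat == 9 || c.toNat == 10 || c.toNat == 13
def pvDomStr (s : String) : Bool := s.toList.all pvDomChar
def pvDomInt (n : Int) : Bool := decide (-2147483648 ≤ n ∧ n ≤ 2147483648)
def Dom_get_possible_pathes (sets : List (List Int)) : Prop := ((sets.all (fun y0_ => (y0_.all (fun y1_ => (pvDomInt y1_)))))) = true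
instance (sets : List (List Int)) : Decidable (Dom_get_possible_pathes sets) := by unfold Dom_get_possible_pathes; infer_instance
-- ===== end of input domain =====

-- B encodes each arrangement as an integer bitmask (one bit per distinct number) and
-- keeps only the distinct masks after every step, instead of materialising every product
-- path as a sorted list and deduplicating once at the end (objective: alternative).

-- ===== PORT A =====
def get_possible_pathes (sets : List (List Int)) : Int :=
  -- all_sets = [[]]; for current_set in sets: nested loops appending sorted copies
  let all_sets : List (List Int) :=
    sets.foldl (fun all_sets current_set =>
      current_set.foldl (fun new_all_sets num =>
        all_sets.foldl (fun new_all_sets all_set =>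
          -- new_all_set = all_set.copy(); if num not in: append; sort
          let new_all_set := if num ∈ all_set then all_set else all_set ++ [num]
          new_all_sets ++ [PySem.List.sorted new_all_set (fun x => x) false]) new_all_sets)
        []) [[]]
  -- final_set = []; for all_set in all_sets: if all_set not in final_set: append
  let final_set : List (List Int) :=
    all_sets.foldl (fun final_set all_set =>
      if all_set ∈ final_set then final_set else final_set ++ [all_set]) []
  (final_set.length : Int)

-- ===== PORT B =====
def get_possible_pathes_alt (sets : List (List Int)) : Int :=
  -- bit = {}; for current_set in sets: for num in current_set: if num not in bit: bit[num] = 1 << len(bit)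
  let bit : PySem.Dict Int Int :=
    sets.foldl (fun bit current_set =>
      current_set.foldl (fun bit num =>
        if bit.contains num then bit else bit.insert num ((1 : Int) <<< bit.size)) bit)
      PySem.Dict.empty
  -- masks = {0}; for current_set in sets: masks = {mask | bit[num] for mask in masks for num in current_set}
  -- bit[num]: every num of sets is a key of bit by construction, so the lookup never raises; getD 0 is exact here
  let masks : PySem.Set Int :=
    sets.foldl (fun masks current_set =>
      masks.foldl (fun acc mask =>
        current_set.foldl (fun acc num =>
          PySem.Set.add acc (Int.lor mask (bit.getD num 0))) acc)
        PySem.Set.empty) [0]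
  (masks.length : Int)

-- ===== PRECONDITION & SPEC =====
def Spec_get_possible_pathes (sets : List (List Int)) (out : Int) : Prop := out = get_possible_pathes_alt sets
instance (sets : List (List Int)) (out : Int) : Decidable (Spec_get_possible_pathes sets out) := by unfold Spec_get_possible_pathes; infer_instance

-- ===== CLAIM (what is proved, stated in full; the proofs are below) =====
def Claim_equal_get_possible_pathes : Prop := ∀ (sets : List (List Int)), Dom_get_possible_pathes sets → Spec_get_possible_pathes sets (get_possible_pathes sets)

-- ===== LEMMAS AND PROOFS =====

-- named forms of the two programs' loop bodies (definitionally equal to the ports)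
def pvComb (num : Int) (st : List Int) : List Int :=
  PySem.List.sorted (if num ∈ st then st else st ++ [num]) (fun x => x) false

def pvAStep (aL : List (List Int)) (cs : List Int) : List (List Int) :=
  cs.foldl (fun new_all_sets num =>
    aL.foldl (fun new_all_sets st =>
      new_all_sets ++ [PySem.List.sorted (if num ∈ st then st else st ++ [num]) (fun x => x) false])
      new_all_sets) []

def pvBitStep (bit : PySem.Dict Int Int) (num : Int) : PySem.Dict Int Int :=
  if bit.contains num then bit else bit.insert num ((1 : Int) <<< bit.size)

def pvBit (sets : List (List Int)) : PySem.Dict Int Int :=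
  sets.foldl (fun b cs => cs.foldl pvBitStep b) PySem.Dict.empty

def pvBStep (bit : PySem.Dict Int Int) (ms : PySem.Set Int) (cs : List Int) : PySem.Set Int :=
  ms.foldl (fun acc mask =>
    cs.foldl (fun acc num => PySem.Set.add acc (Int.lor mask (bit.getD num 0))) acc)
    PySem.Set.empty

lemma pv_a_eq (sets : List (List Int)) :
    get_possible_pathes sets =
      (((sets.foldl pvAStep [[]]).foldl
          (fun fs s => if s ∈ fs then fs else fs ++ [s]) []).length : Int) := rfl

lemma pv_alt_eq (sets : List (List Int)) :
    get_possible_pathes_alt sets =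
      ((sets.foldl (pvBStep (pvBit sets)) [0]).length : Int) := rfl

-- the bitmask encoding of a state
def pvBv (d : PySem.Dict Int Int) (x : Int) : Nat := (d.getD x 0).toNat

def pvEnc (d : PySem.Dict Int Int) (l : List Int) : Nat :=
  l.foldr (fun x m => pvBv d x ||| m) 0

-- canonical states: strictly sorted lists of keys of the bit dictionary
def pvCanon (d : PySem.Dict Int Int) (l : List Int) : Prop :=
  l.Pairwise (· < ·) ∧ ∀ x ∈ l, d.contains x = true

-- the bit dictionary assigns the powers 2^0, 2^1, … to its keys in insertion order
def pvGood (d : PySem.Dict Int Int) : Prop :=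
  d.keys.Nodup ∧ d.items.map Prod.snd = (List.range d.items.length).map (fun i => ((2:Int)^i))

lemma pv_shift (n : Nat) : (1 : Int) <<< n = (2:Int)^n := by
  show Int.shiftLeft 1 n = _
  unfold Int.shiftLeft
  simp [Nat.shiftLeft_eq]

lemma pv_toNat_pow (i : Nat) : ((2:Int)^i).toNat = 2^i := by
  rw [show ((2:Int)) = ((2:Nat):Int) from rfl, ← Nat.cast_pow, Int.toNat_natCast]

lemma pv_pow_inj (i j : Nat) (h : (2:Int)^i = (2:Int)^j) : i = j := by
  have := congrArg Int.toNat h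
  rw [pv_toNat_pow, pv_toNat_pow] at this
  exact Nat.pow_right_injective le_rfl this

lemma pv_pow_ofNat (i : Nat) : (2:Int)^i = Int.ofNat (2^i) := by
  rw [Int.ofNat_eq_natCast]; push_cast; ring

-- building the bit dictionary keeps it good
lemma pv_good_step (d : PySem.Dict Int Int) (num : Int) (h : pvGood d) :
    pvGood (pvBitStep d num) := by
  unfold pvBitStep
  by_cases hc : d.contains num = true
  · simp only [hc, if_true]; exact h
  · simp only [hc, Bool.false_eq_true, if_false]
    constructor
    · exact PySem.Dict.nodup_keys_insert d num _ h.1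
    · rw [PySem.Dict.items_insert_of_not_contains d _ (by simpa using hc)]
      rw [List.map_append, List.length_append, h.2]
      simp [List.range_succ, pv_shift, PySem.Dict.size]

lemma pv_inner_good (cs : List Int) (d : PySem.Dict Int Int) (hd : pvGood d) :
    pvGood (cs.foldl pvBitStep d) := by
  induction cs generalizing d with
  | nil => exact hd
  | cons x xs ih => exact ih _ (pv_good_step d x hd)

lemma pv_good_bit (sets : List (List Int)) : pvGood (pvBit sets) := by
  unfold pvBit
  have gen : ∀ (ss : List (List Int)) (d : PySem.Dict Int Int), pvGood d →
      pvGood (ss.foldl (fun b c => c.foldl pvBitStep b) d) := by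
    intro ss
    induction ss with
    | nil => intro d hd; exact hd
    | cons c rest ih => intro d hd; exact ih _ (pv_inner_good c d hd)
  apply gen
  exact ⟨by simp [PySem.Dict.keys, PySem.Dict.empty], by simp [PySem.Dict.empty]⟩

lemma pv_step_contains_mono (d : PySem.Dict Int Int) (num x : Int)
    (h : d.contains x = true) : (pvBitStep d num).contains x = true := by
  unfold pvBitStep
  split
  · exact h
  · rw [PySem.Dict.contains_insert]; simp [h]

lemma pv_fold_contains_mono (cs : List Int) (d : PySem.Dict Int Int) (x : Int)
    (h : d.contains x = true) : (cs.foldl pvBitStep d).contains x = true := by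
  induction cs generalizing d with
  | nil => exact h
  | cons a as ih => exact ih _ (pv_step_contains_mono d a x h)

lemma pv_fold2_contains_mono (ss : List (List Int)) (d : PySem.Dict Int Int) (x : Int)
    (h : d.contains x = true) :
    (ss.foldl (fun b c => c.foldl pvBitStep b) d).contains x = true := by
  induction ss generalizing d with
  | nil => exact h
  | cons c rest ih => exact ih _ (pv_fold_contains_mono c d x h)

lemma pv_step_contains_self (d : PySem.Dict Int Int) (num : Int) :
    (pvBitStep d num).contains num = true := by
  unfold pvBitStep
  split
  · assumption
  · rw [PySem.Dict.contains_insert]; simp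

lemma pv_fold_contains_of_mem (cs : List Int) (d : PySem.Dict Int Int) (num : Int)
    (hmem : num ∈ cs) : (cs.foldl pvBitStep d).contains num = true := by
  have gen : ∀ (l : List Int) (d : PySem.Dict Int Int), num ∈ l →
      (l.foldl pvBitStep d).contains num = true := by
    intro l
    induction l with
    | nil => intro d h; cases h
    | cons a as ih =>
      intro d h
      rcases List.mem_cons.mp h with rfl | h'
      · exact pv_fold_contains_mono as _ num (pv_step_contains_self d num)
      · exact ih _ h'
  exact gen cs d hmem

lemma pv_bit_contains_all (sets : List (List Int)) (cs : List Int) (num : Int)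
    (h1 : cs ∈ sets) (h2 : num ∈ cs) : (pvBit sets).contains num = true := by
  unfold pvBit
  have gen : ∀ (ss : List (List Int)) (d : PySem.Dict Int Int), cs ∈ ss →
      (ss.foldl (fun b c => c.foldl pvBitStep b) d).contains num = true := by
    intro ss
    induction ss with
    | nil => intro d h; cases h
    | cons c rest ih =>
      intro d h
      rcases List.mem_cons.mp h with rfl | h'
      · exact pv_fold2_contains_mono rest _ num (pv_fold_contains_of_mem cs d num h2)
      · exact ih (c.foldl pvBitStep d) h'
  exact gen sets PySem.Dict.empty h1

-- a good dictionary maps every key to a power of two, injectively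
lemma pv_good_getD_pow (d : PySem.Dict Int Int) (h : pvGood d) (x : Int)
    (hc : d.contains x = true) : ∃ i, d.getD x 0 = (2:Int)^i := by
  cases hq : d.get? x with
  | none =>
    rw [PySem.Dict.get?_eq_none_iff_contains] at hq
    rw [hc] at hq; cases hq
  | some v =>
    have hmem := (PySem.Dict.get?_eq_some_iff_mem_items d x v h.1).mp hq
    have hv : v ∈ d.items.map Prod.snd := List.mem_map_of_mem hmem
    rw [h.2] at hv
    obtain ⟨i, _, rfl⟩ := List.mem_map.mp hv
    exact ⟨i, PySem.Dict.getD_of_get?_eq_some d 0 hq⟩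

lemma pv_snd_inj {l : List (Int × Int)} (hnd : (l.map Prod.snd).Nodup) {x y v : Int}
    (hx : (x, v) ∈ l) (hy : (y, v) ∈ l) : x = y := by
  induction l with
  | nil => cases hx
  | cons p rest ih =>
    rw [List.map_cons, List.nodup_cons] at hnd
    rcases List.mem_cons.mp hx with rfl | hx'
    · rcases List.mem_cons.mp hy with h | hy'
      · exact (congrArg Prod.fst h).symm
      · exact absurd (List.mem_map_of_mem hy') hnd.1
    · rcases List.mem_cons.mp hy with rfl | hy'
      · exact absurd (List.mem_map_of_mem hx') hnd.1
      · exact ih hnd.2 hx' hy'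

lemma pv_good_inj (d : PySem.Dict Int Int) (h : pvGood d) (x y : Int)
    (hx : d.contains x = true) (hy : d.contains y = true)
    (he : d.getD x 0 = d.getD y 0) : x = y := by
  cases hqx : d.get? x with
  | none => rw [PySem.Dict.get?_eq_none_iff_contains] at hqx; rw [hx] at hqx; cases hqx
  | some v =>
    cases hqy : d.get? y with
    | none => rw [PySem.Dict.get?_eq_none_iff_contains] at hqy; rw [hy] at hqy; cases hqy
    | some w =>
      have hgx := PySem.Dict.getD_of_get?_eq_some d (0 : Int) hqx
      have hgy := PySem.Dict.getD_of_get?_eq_some d (0 : Int) hqy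
      have hvw : v = w := by rw [← hgx, ← hgy, he]
      subst hvw
      have hmx := (PySem.Dict.get?_eq_some_iff_mem_items d x v h.1).mp hqx
      have hmy := (PySem.Dict.get?_eq_some_iff_mem_items d y v h.1).mp hqy
      have hnd : (d.items.map Prod.snd).Nodup := by
        rw [h.2]
        exact List.Nodup.map (fun i j hij => pv_pow_inj i j hij) (List.nodup_range)
      exact pv_snd_inj hnd hmx hmy

lemma pv_bv_pow (d : PySem.Dict Int Int) (h : pvGood d) (x : Int)
    (hc : d.contains x = true) : ∃ i, pvBv d x = 2^i ∧ d.getD x 0 = (2:Int)^i := by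
  obtain ⟨i, hg⟩ := pv_good_getD_pow d h x hc
  exact ⟨i, by unfold pvBv; rw [hg, pv_toNat_pow], hg⟩

lemma pv_getD_ofNat (d : PySem.Dict Int Int) (h : pvGood d) (x : Int)
    (hc : d.contains x = true) : d.getD x 0 = Int.ofNat (pvBv d x) := by
  obtain ⟨i, hbv, hg⟩ := pv_bv_pow d h x hc
  rw [hg, hbv, pv_pow_ofNat]

-- encoding facts
lemma pv_enc_foldr_init (d : PySem.Dict Int Int) (l : List Int) (a : Nat) :
    l.foldr (fun x m => pvBv d x ||| m) a = pvEnc d l ||| a := by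
  induction l with
  | nil => simp [pvEnc]
  | cons x l ih => simp only [List.foldr_cons, ih, pvEnc, Nat.or_assoc]

lemma pv_enc_append (d : PySem.Dict Int Int) (l : List Int) (num : Int) :
    pvEnc d (l ++ [num]) = pvEnc d l ||| pvBv d num := by
  show (l ++ [num]).foldr (fun x m => pvBv d x ||| m) 0 = _
  rw [List.foldr_append, List.foldr_cons, List.foldr_nil, Nat.or_zero, pv_enc_foldr_init]

lemma pv_enc_testBit (d : PySem.Dict Int Int) (l : List Int) (j : Nat) :
    (pvEnc d l).testBit j = l.any (fun x => (pvBv d x).testBit j) := by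
  induction l with
  | nil => simp [pvEnc]
  | cons x l ih =>
    show ((pvBv d x ||| pvEnc d l).testBit j) = _
    simp [ih]

lemma pv_enc_perm (d : PySem.Dict Int Int) {l1 l2 : List Int} (h : l1.Perm l2) :
    pvEnc d l1 = pvEnc d l2 :=
  Nat.eq_of_testBit_eq (fun j => by rw [pv_enc_testBit, pv_enc_testBit, h.any_eq])

lemma pv_enc_absorb (d : PySem.Dict Int Int) (l : List Int) (num : Int) (h : num ∈ l) :
    pvEnc d l ||| pvBv d num = pvEnc d l := by
  apply Nat.eq_of_testBit_eq
  intro j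
  rw [Nat.testBit_lor, pv_enc_testBit]
  cases hb : (pvBv d num).testBit j with
  | false => simp
  | true =>
    have hany : l.any (fun x => (pvBv d x).testBit j) = true := by
      rw [List.any_eq_true]; exact ⟨num, h, hb⟩
    simp [hany]

lemma pv_enc_comb (d : PySem.Dict Int Int) (st : List Int) (num : Int) :
    pvEnc d (pvComb num st) = pvEnc d st ||| pvBv d num := by
  unfold pvComb
  by_cases hm : num ∈ st
  · rw [if_pos hm, pv_enc_perm d (PySem.List.sorted_perm st (fun x => x) false)]
    exact (pv_enc_absorb d st num hm).symm
  · rw [if_neg hm, pv_enc_perm d (PySem.List.sorted_perm (st ++ [num]) (fun x => x) false),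
      pv_enc_append]

lemma pv_canon_comb (d : PySem.Dict Int Int) (num : Int) (st : List Int)
    (h : pvCanon d st) (hc : d.contains num = true) : pvCanon d (pvComb num st) := by
  unfold pvComb
  by_cases hm : num ∈ st
  · rw [if_pos hm,
      PySem.List.sorted_eq_of_perm_of_pairwise_lt st st (fun x => x) (List.Perm.refl st) h.1]
    exact h
  · rw [if_neg hm]
    have hperm := PySem.List.sorted_perm (st ++ [num]) (fun x => x) false
    constructor
    · have hndst : st.Nodup := h.1.imp (fun hlt => ne_of_lt hlt)
      have hnd : (st ++ [num]).Nodup := by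
        simp [List.nodup_append, hndst]
        intro a ha he
        exact hm (he ▸ ha)
      have hnd2 := (hperm.symm).nodup hnd
      have hle := PySem.List.sorted_pairwise (st ++ [num]) (fun x => x)
      exact (hle.and hnd2).imp (fun hab => lt_of_le_of_ne hab.1 hab.2)
    · intro x hx
      rcases List.mem_append.mp (hperm.mem_iff.mp hx) with h1 | h2
      · exact h.2 x h1
      · rw [List.mem_singleton.mp h2]; exact hc

lemma pv_enc_mem_sub (d : PySem.Dict Int Int) (h : pvGood d) {l1 l2 : List Int}
    (h1 : pvCanon d l1) (h2 : pvCanon d l2) (he : pvEnc d l1 = pvEnc d l2) :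
    ∀ x ∈ l1, x ∈ l2 := by
  intro x hx
  obtain ⟨i, hbv, hgd⟩ := pv_bv_pow d h x (h1.2 x hx)
  have ht : (pvEnc d l1).testBit i = true := by
    rw [pv_enc_testBit]
    exact List.any_eq_true.mpr ⟨x, hx, by simp [hbv]⟩
  rw [he, pv_enc_testBit] at ht
  obtain ⟨y, hy, hby⟩ := List.any_eq_true.mp ht
  have hby' : (pvBv d y).testBit i = true := hby
  obtain ⟨j, hbvy, hgdy⟩ := pv_bv_pow d h y (h2.2 y hy)
  rw [hbvy, Nat.testBit_two_pow] at hby'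
  have hji : j = i := of_decide_eq_true hby'
  subst hji
  have hyx : y = x := pv_good_inj d h y x (h2.2 y hy) (h1.2 x hx) (by rw [hgdy, hgd])
  exact hyx ▸ hy

lemma pv_enc_inj (d : PySem.Dict Int Int) (h : pvGood d) {l1 l2 : List Int}
    (h1 : pvCanon d l1) (h2 : pvCanon d l2) (he : pvEnc d l1 = pvEnc d l2) : l1 = l2 := by
  have s12 := pv_enc_mem_sub d h h1 h2 he
  have s21 := pv_enc_mem_sub d h h2 h1 he.symm
  have hn1 : l1.Nodup := h1.1.imp (fun hlt => ne_of_lt hlt)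
  have hn2 : l2.Nodup := h2.1.imp (fun hlt => ne_of_lt hlt)
  have hperm : l1.Perm l2 :=
    (List.perm_ext_iff_of_nodup hn1 hn2).mpr (fun a => ⟨s12 a, s21 a⟩)
  exact List.Perm.eq_of_pairwise
    (fun a b _ _ hab hba => absurd hab (lt_asymm hba)) h1.1 h2.1 hperm

-- step membership characterisations
lemma pvAStep_mem (prev : List (List Int)) (cs : List Int) (x : List Int) :
    x ∈ pvAStep prev cs ↔ ∃ num ∈ cs, ∃ st ∈ prev, x = pvComb num st := by
  unfold pvAStep pvComb
  simp only [PySem.List.foldl_append_singleton_eq_map, PySem.List.foldl_append_eq_flatMap,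
    List.nil_append, List.mem_flatMap, List.mem_map]
  constructor
  · rintro ⟨num, h1, st, h2, rfl⟩; exact ⟨num, h1, st, h2, rfl⟩
  · rintro ⟨num, h1, st, h2, rfl⟩; exact ⟨num, h1, st, h2, rfl⟩

lemma pvBStep_mem (bit : PySem.Dict Int Int) (ms : PySem.Set Int) (cs : List Int) (m : Int) :
    m ∈ pvBStep bit ms cs ↔ ∃ mask ∈ ms, ∃ num ∈ cs, m = Int.lor mask (bit.getD num 0) := by
  unfold pvBStep
  have gen : ∀ (l : PySem.Set Int) (s0 : PySem.Set Int),
      m ∈ l.foldl (fun acc mask =>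
        cs.foldl (fun acc num => PySem.Set.add acc (Int.lor mask (bit.getD num 0))) acc) s0 ↔
      m ∈ s0 ∨ ∃ mask ∈ l, ∃ num ∈ cs, m = Int.lor mask (bit.getD num 0) := by
    intro l
    induction l with
    | nil => intro s0; simp
    | cons mask rest ih =>
      intro s0
      rw [List.foldl_cons, ih, PySem.Set.mem_foldl_add]
      constructor
      · rintro (⟨h | ⟨num, h1, rfl⟩⟩ | ⟨mask', h2, num, h1, rfl⟩)
        · exact Or.inl h
        · exact Or.inr ⟨mask, List.mem_cons_self .., num, h1, rfl⟩
        · exact Or.inr ⟨mask', List.mem_cons_of_mem _ h2, num, h1, rfl⟩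
      · rintro (h | ⟨mask', hmm, num, h1, rfl⟩)
        · exact Or.inl (Or.inl h)
        · rcases List.mem_cons.mp hmm with rfl | h2
          · exact Or.inl (Or.inr ⟨num, h1, rfl⟩)
          · exact Or.inr ⟨mask', h2, num, h1, rfl⟩
  rw [gen ms PySem.Set.empty]
  simp [PySem.Set.empty]

lemma pvBStep_nodup (bit : PySem.Dict Int Int) (ms : PySem.Set Int) (cs : List Int) :
    (pvBStep bit ms cs).Nodup := by
  unfold pvBStep
  have gen : ∀ (l : PySem.Set Int) (s0 : PySem.Set Int), s0.Nodup →
      (l.foldl (fun acc mask =>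
        cs.foldl (fun acc num => PySem.Set.add acc (Int.lor mask (bit.getD num 0))) acc)
        s0).Nodup := by
    intro l
    induction l with
    | nil => intro s0 h0; exact h0
    | cons mask rest ih =>
      intro s0 h0
      rw [List.foldl_cons]
      apply ih
      rw [← PySem.Set.update_map_eq_foldl_add]
      exact PySem.Set.nodup_update _ _ h0
  exact gen ms PySem.Set.empty List.nodup_nil

-- the main loop invariant: B's mask set is exactly the image under pvEnc of A's state list
lemma pv_loop (bit : PySem.Dict Int Int) (hg : pvGood bit) :
    ∀ (rem : List (List Int)) (aL : List (List Int)) (bS : PySem.Set Int),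
      (∀ cs ∈ rem, ∀ num ∈ cs, bit.contains num = true) →
      bS.Nodup →
      (∀ st ∈ aL, pvCanon bit st) →
      (∀ m, m ∈ bS ↔ ∃ st ∈ aL, m = Int.ofNat (pvEnc bit st)) →
      (rem.foldl (pvBStep bit) bS).Nodup ∧
      (∀ st ∈ rem.foldl pvAStep aL, pvCanon bit st) ∧
      (∀ m, m ∈ rem.foldl (pvBStep bit) bS ↔
        ∃ st ∈ rem.foldl pvAStep aL, m = Int.ofNat (pvEnc bit st)) := by
  intro rem
  induction rem with
  | nil => intro aL bS _ hnd hc hm; exact ⟨hnd, hc, hm⟩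
  | cons cs rest ih =>
    intro aL bS hk hnd hc hm
    simp only [List.foldl_cons]
    apply ih
    · intro c hcm num hnum; exact hk c (List.mem_cons_of_mem _ hcm) num hnum
    · exact pvBStep_nodup _ _ _
    · intro st hst
      obtain ⟨num, hnum, st0, hst0, rfl⟩ := (pvAStep_mem aL cs st).mp hst
      exact pv_canon_comb _ num st0 (hc st0 hst0) (hk cs (List.mem_cons_self ..) num hnum)
    · intro m
      rw [pvBStep_mem]
      constructor
      · rintro ⟨mask, hmask, num, hnum, rfl⟩
        obtain ⟨st, hst, rfl⟩ := (hm mask).mp hmask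
        refine ⟨pvComb num st, (pvAStep_mem aL cs _).mpr ⟨num, hnum, st, hst, rfl⟩, ?_⟩
        rw [pv_enc_comb, pv_getD_ofNat bit hg num (hk cs (List.mem_cons_self ..) num hnum)]
        rfl
      · rintro ⟨st', hst', rfl⟩
        obtain ⟨num, hnum, st, hst, rfl⟩ := (pvAStep_mem aL cs st').mp hst'
        refine ⟨Int.ofNat (pvEnc bit st), (hm _).mpr ⟨st, hst, rfl⟩, num, hnum, ?_⟩
        rw [pv_enc_comb, pv_getD_ofNat bit hg num (hk cs (List.mem_cons_self ..) num hnum)]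
        rfl

-- ===== VERDICT (by name: the statement is the Claim_ definition above) =====
theorem get_possible_pathes_spec : Claim_equal_get_possible_pathes := by
  unfold Claim_equal_get_possible_pathes Spec_get_possible_pathes
  intro sets _
  rw [pv_a_eq, pv_alt_eq]
  have hg := pv_good_bit sets
  obtain ⟨hnd, hcanon, hmem⟩ :=
    pv_loop (pvBit sets) hg sets [[]] [0]
      (fun cs hcs num hnum => pv_bit_contains_all sets cs num hcs hnum)
      (by simp)
      (by intro st hst; simp at hst; subst hst; exact ⟨List.Pairwise.nil, by simp⟩)
      (by intro m; simp [pvEnc])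
  have hfold : (sets.foldl pvAStep [[]]).foldl
      (fun fs s => if s ∈ fs then fs else fs ++ [s]) []
      = PySem.Set.ofList (sets.foldl pvAStep [[]]) := by
    rw [PySem.Set.ofList_eq_foldl]
    congr 1
    funext fs s
    rw [PySem.Set.add_eq_ite]
  rw [hfold]
  have hmapnd : ((PySem.Set.ofList (sets.foldl pvAStep [[]])).map
      (fun st => Int.ofNat (pvEnc (pvBit sets) st))).Nodup := by
    refine List.Nodup.map_on ?_ (PySem.Set.nodup_ofList _)
    intro x hxm y hym hfe
    exact pv_enc_inj _ hg (hcanon x ((PySem.Set.mem_ofList _ x).mp hxm))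
      (hcanon y ((PySem.Set.mem_ofList _ y).mp hym)) (Int.ofNat.inj hfe)
  have hperm : ((PySem.Set.ofList (sets.foldl pvAStep [[]])).map
      (fun st => Int.ofNat (pvEnc (pvBit sets) st))).Perm
      (sets.foldl (pvBStep (pvBit sets)) [0]) := by
    rw [List.perm_ext_iff_of_nodup hmapnd hnd]
    intro a
    rw [List.mem_map, hmem a]
    constructor
    · rintro ⟨st, hst, rfl⟩
      exact ⟨st, (PySem.Set.mem_ofList _ st).mp hst, rfl⟩
    · rintro ⟨st, hst, rfl⟩
      exact ⟨st, (PySem.Set.mem_ofList _ st).mpr hst, rfl⟩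
  have hlen := hperm.length_eq
  rw [List.length_map] at hlen
  exact_mod_cast hlen
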